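-- pv_equiv track=rewrite | github.com/Alatius/cavallinlatin | proofread/spurious_breaks.py | _clean_html_text
-- ===== SOURCE A (Python) =====
-- def _strip_tags_with_positions(text):
--     """Strip tags from text, returning (clean_text, mapping) where mapping[i]
--     gives the position in the original text for clean_text[i]."""
--     result = []
--     mapping = []
--     i = 0
--     while i < len(text):
--         if text[i] == '<':
--             end = text.find('>', i)
--             if end == -1:
--                 result.append(text[i])
--                 mapping.append(i)
--                 i += 1
--             else:
--                 i = end + 1
--         else:
--             result.append(text[i])
--             mapping.append(i)
--             i += 1
--     return ''.join(result), mapping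
--
-- def _clean_html_text(html):
--     """Clean HTML for alignment: strip tags, collapse whitespace.
--     Returns (clean_text, mapping_to_original)."""
--     text, mapping = _strip_tags_with_positions(html)
--
--     result = []
--     result_map = []
--     for i, ch in enumerate(text):
--         if ch in (' ', '\n', '\t'):
--             if result and result[-1] != ' ':
--                 result.append(' ')
--                 result_map.append(mapping[i])
--         else:
--             result.append(ch)
--             result_map.append(mapping[i])
--     return ''.join(result), result_map
-- ===== SOURCE B (Python) =====
-- def _clean_html_text(html):
--     """Clean HTML for alignment: strip tags, collapse whitespace.
--     Single pass over the raw html; no intermediate stripped text/mapping."""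
--     result = []
--     result_map = []
--     i = 0
--     n = len(html)
--     while i < n:
--         ch = html[i]
--         if ch == '<':
--             end = html.find('>', i)
--             if end != -1:
--                 i = end + 1
--                 continue
--         if ch in (' ', '\n', '\t'):
--             if result and result[-1] != ' ':
--                 result.append(' ')
--                 result_map.append(i)
--         else:
--             result.append(ch)
--             result_map.append(i)
--         i += 1
--     return ''.join(result), result_map
-- ===== Notes on version B (the rewrite author's own statement) =====
-- stated objective: simpler
-- what changed: B fuses A's two passes (tag stripping with a position map, then whitespace collapsing over that intermediate text) into a single index scan of the raw html that maintains result and result_map directly, never materialising the stripped text or its mapping.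
import Mathlib
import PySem

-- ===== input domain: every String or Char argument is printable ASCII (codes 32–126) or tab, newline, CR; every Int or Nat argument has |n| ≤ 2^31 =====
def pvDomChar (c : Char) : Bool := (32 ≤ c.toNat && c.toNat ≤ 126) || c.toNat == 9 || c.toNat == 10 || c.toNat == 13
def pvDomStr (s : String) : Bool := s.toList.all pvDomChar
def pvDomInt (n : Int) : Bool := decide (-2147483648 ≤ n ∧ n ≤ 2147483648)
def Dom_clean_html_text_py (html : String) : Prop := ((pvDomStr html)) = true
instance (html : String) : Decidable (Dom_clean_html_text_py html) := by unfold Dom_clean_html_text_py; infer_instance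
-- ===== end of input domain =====

-- B fuses A's two passes (tag stripping, then whitespace collapsing) into one scan of the
-- raw html, never building the intermediate stripped text or its mapping (objective: simpler).

-- text.find('>', i) for a single character: index of first '>' at position ≥ i, none if absent.
-- Fuel recursion (fuel = text.length - i is exactly enough: i advances by 1 per unit of fuel).
def findGtF : Nat → List Char → Nat → Option Nat
  | 0, _, _ => none
  | fuel + 1, text, i =>
    if h : i < text.length then
      if text[i] = '>' then some i else findGtF fuel text (i + 1)
    else none

def findGt (text : List Char) (i : Nat) : Option Nat := findGtF (text.length - i) text i

-- ===== PORT A =====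
-- _strip_tags_with_positions: the while loop, building result/mapping front-to-back by cons.
-- Fuel recursion: i strictly increases each iteration, so fuel = text.length + 1 always suffices.
def stripLoop : Nat → List Char → Nat → List Char × List Int
  | 0, _, _ => ([], [])
  | fuel + 1, text, i =>
    if h : i < text.length then
      if text[i] = '<' then
        match findGt text i with
        | none =>
            let p := stripLoop fuel text (i + 1)
            (text[i] :: p.1, (i : Int) :: p.2)
        | some e => stripLoop fuel text (e + 1)
      else
        let p := stripLoop fuel text (i + 1)
        (text[i] :: p.1, (i : Int) :: p.2)
    else ([], [])

-- the 'for i, ch in enumerate(text)' pass; since len(mapping) = len(text), enumerate(text)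
-- with mapping[i] is exactly the walk over text.zip mapping
def pass2 : List (Char × Int) → List Char → List Int → List Char × List Int
  | [], res, rm => (res, rm)
  | (ch, p) :: rest, res, rm =>
    if ch = ' ' ∨ ch = '\n' ∨ ch = '\t' then
      if res ≠ [] ∧ res.getLast? ≠ some ' ' then
        pass2 rest (res ++ [' ']) (rm ++ [p])
      else pass2 rest res rm
    else pass2 rest (res ++ [ch]) (rm ++ [p])

def clean_html_text_py (html : String) : String × List Int :=
  (String.ofList (pass2 ((stripLoop (html.toList.length + 1) html.toList 0).1.zip
      (stripLoop (html.toList.length + 1) html.toList 0).2) [] []).1,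
   (pass2 ((stripLoop (html.toList.length + 1) html.toList 0).1.zip
      (stripLoop (html.toList.length + 1) html.toList 0).2) [] []).2)

-- ===== PORT B =====
-- single while loop over the raw html, maintaining result/result_map directly (same fuel pattern)
def bLoop : Nat → List Char → Nat → List Char → List Int → List Char × List Int
  | 0, _, _, res, rm => (res, rm)
  | fuel + 1, text, i, res, rm =>
    if h : i < text.length then
      if text[i] = '<' ∧ (findGt text i).isSome then
        bLoop fuel text ((findGt text i).getD 0 + 1) res rm
      else if text[i] = ' ' ∨ text[i] = '\n' ∨ text[i] = '\t' then
        if res ≠ [] ∧ res.getLast? ≠ some ' ' then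
          bLoop fuel text (i + 1) (res ++ [' ']) (rm ++ [(i : Int)])
        else bLoop fuel text (i + 1) res rm
      else bLoop fuel text (i + 1) (res ++ [text[i]]) (rm ++ [(i : Int)])
    else (res, rm)

def clean_html_text_py_alt (html : String) : String × List Int :=
  (String.ofList (bLoop (html.toList.length + 1) html.toList 0 [] []).1,
   (bLoop (html.toList.length + 1) html.toList 0 [] []).2)

-- ===== PRECONDITION & SPEC =====
def Spec_clean_html_text_py (html : String) (out : String × List Int) : Prop := out = clean_html_text_py_alt html
instance (html : String) (out : String × List Int) : Decidable (Spec_clean_html_text_py html out) := by unfold Spec_clean_html_text_py; infer_instance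

-- ===== CLAIM (what is proved, stated in full; the proofs are below) =====
def Claim_equal_clean_html_text_py : Prop := ∀ (html : String), Dom_clean_html_text_py html → Spec_clean_html_text_py html (clean_html_text_py html)

-- ===== LEMMAS AND PROOFS =====

-- both loops consume one unit of fuel per iteration and make identical i-transitions,
-- so running A's second pass over stripLoop's output is step-for-step B's loop
theorem fuse (fuel : Nat) : ∀ (text : List Char) (i : Nat) (res : List Char) (rm : List Int),
    pass2 ((stripLoop fuel text i).1.zip (stripLoop fuel text i).2) res rm =
      bLoop fuel text i res rm := by
  induction fuel with
  | zero => intro text i res rm; simp [stripLoop, bLoop, pass2]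
  | succ fuel ih =>
      intro text i res rm
      rw [stripLoop, bLoop]
      by_cases h : i < text.length
      · simp only [h, dif_pos]
        by_cases hlt : text[i] = '<'
        · cases hf : findGt text i with
          | none =>
              have hw : ¬ ('<' = ' ' ∨ '<' = '\n' ∨ '<' = '\t') := by decide
              simp only [hlt, hw, Option.isSome_none, Bool.false_eq_true, and_false,
                if_true, if_neg, not_false_iff, List.zip_cons_cons, pass2]
              exact ih text (i + 1) (res ++ ['<']) (rm ++ [(i : Int)])
          | some e =>
              simp only [hlt, Option.isSome_some, and_self, if_true, Option.getD_some]
              exact ih text (e + 1) res rm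
        · have hb : ¬ (text[i] = '<' ∧ (findGt text i).isSome = true) := by simp [hlt]
          rw [if_neg hlt, if_neg hb]
          by_cases hw : text[i] = ' ' ∨ text[i] = '\n' ∨ text[i] = '\t'
          · by_cases hr : res ≠ [] ∧ res.getLast? ≠ some ' '
            · simp only [List.zip_cons_cons, pass2, hw, if_pos]
              rw [if_pos hr, if_pos hr]
              exact ih text (i + 1) (res ++ [' ']) (rm ++ [(i : Int)])
            · simp only [List.zip_cons_cons, pass2, hw, if_pos, hr, if_neg, not_false_iff]
              exact ih text (i + 1) res rm
          · simp only [List.zip_cons_cons, pass2, hw, if_neg, not_false_iff]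
            exact ih text (i + 1) (res ++ [text[i]]) (rm ++ [(i : Int)])
      · simp [h, pass2]

-- ===== VERDICT (by name: the statement is the Claim_ definition above) =====
theorem clean_html_text_py_spec : Claim_equal_clean_html_text_py := by
  intro html _
  unfold Spec_clean_html_text_py clean_html_text_py clean_html_text_py_alt
  rw [fuse (html.toList.length + 1) html.toList 0 [] []]
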